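-- pv_equiv track=rewrite | github.com/matheusviannapr/IEBTauto | streamlit_app.py | criar_lista_materiais
-- ===== SOURCE A (Python) =====
-- def criar_lista_materiais(circuitos, disjuntores_gerais):
--     materiais = {}
--     for circuito in circuitos:
--         num_fases = circuito['num_fases']
--         disjuntor = circuito['Disjuntor (Ampere)']
--         if num_fases not in materiais:
--             materiais[num_fases] = {}
--         if disjuntor not in materiais[num_fases]:
--             materiais[num_fases][disjuntor] = 0
--         materiais[num_fases][disjuntor] += 1
--     for quadro, disjuntor_quadro in disjuntores_gerais.items():
--         num_fases = 3
--         if num_fases not in materiais: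
--             materiais[num_fases] = {}
--         if disjuntor_quadro not in materiais[num_fases]:
--             materiais[num_fases][disjuntor_quadro] = 0
--         materiais[num_fases][disjuntor_quadro] += 1
--     return materiais
-- ===== SOURCE B (Python) =====
-- def criar_lista_materiais(circuitos, disjuntores_gerais):
--     # one flat tally keyed by (phase, rating), then reshape into the nested dict
--     pairs = [(c['num_fases'], c['Disjuntor (Ampere)']) for c in circuitos]
--     pairs += [(3, d) for d in disjuntores_gerais.values()]
--     tally = {}
--     for key in pairs:
--         tally[key] = tally.get(key, 0) + 1
--     materiais = {}
--     for (fase, amp), n in tally.items():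
--         materiais.setdefault(fase, {})[amp] = n
--     return materiais
-- ===== Notes on version B (the rewrite author's own statement) =====
-- stated objective: alternative
-- what changed: Replaces A's inline incremental nested-dict construction with a two-pass flat-count-then-reshape: one flat tally keyed by (phase, rating) built from a single concatenated pair stream, then a second pass that reshapes the tally into the nested dict.
import Mathlib
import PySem

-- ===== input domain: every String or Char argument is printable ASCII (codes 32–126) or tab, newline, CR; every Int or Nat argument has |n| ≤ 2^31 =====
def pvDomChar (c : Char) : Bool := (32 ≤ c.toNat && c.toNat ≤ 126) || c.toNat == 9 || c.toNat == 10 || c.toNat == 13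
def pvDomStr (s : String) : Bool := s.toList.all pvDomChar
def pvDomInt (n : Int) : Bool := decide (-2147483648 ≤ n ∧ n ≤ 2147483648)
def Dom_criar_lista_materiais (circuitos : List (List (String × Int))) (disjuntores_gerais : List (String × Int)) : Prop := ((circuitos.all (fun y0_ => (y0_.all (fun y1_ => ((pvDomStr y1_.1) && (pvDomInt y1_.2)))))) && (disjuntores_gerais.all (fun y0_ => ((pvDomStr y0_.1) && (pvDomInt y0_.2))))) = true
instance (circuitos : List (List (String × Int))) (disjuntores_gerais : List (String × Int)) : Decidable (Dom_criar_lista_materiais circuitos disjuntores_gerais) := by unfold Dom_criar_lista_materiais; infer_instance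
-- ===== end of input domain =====

-- B replaces A's inline incremental nested-dict construction with a flat (phase, rating) tally built
-- in one pass over a concatenated pair stream, reshaped into the nested dict in a second pass.


-- ===== PORT A =====
def criar_lista_materiais (circuitos : List (List (String × Int))) (disjuntores_gerais : List (String × Int)) : List (Int × List (Int × Int)) :=
  let materiais : PySem.Dict Int (PySem.Dict Int Int) :=
    circuitos.foldl (fun materiais circuito =>
      let num_fases := (PySem.Dict.ofList circuito).getD "num_fases" 0
      let disjuntor := (PySem.Dict.ofList circuito).getD "Disjuntor (Ampere)" 0
      let materiais := if materiais.contains num_fases then materiais else materiais.insert num_fases PySem.Dict.empty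
      let inner := materiais.getD num_fases PySem.Dict.empty
      let inner := if inner.contains disjuntor then inner else inner.insert disjuntor 0
      materiais.insert num_fases (inner.insert disjuntor (inner.getD disjuntor 0 + 1))) PySem.Dict.empty
  let materiais :=
    disjuntores_gerais.foldl (fun materiais q =>
      let num_fases : Int := 3
      let disjuntor_quadro := q.2
      let materiais := if materiais.contains num_fases then materiais else materiais.insert num_fases PySem.Dict.empty
      let inner := materiais.getD num_fases PySem.Dict.empty
      let inner := if inner.contains disjuntor_quadro then inner else inner.insert disjuntor_quadro 0
      materiais.insert num_fases (inner.insert disjuntor_quadro (inner.getD disjuntor_quadro 0 + 1))) materiais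
  materiais.items.map (fun p => (p.1, p.2.items))

-- ===== PORT B =====
def criar_lista_materiais_alt (circuitos : List (List (String × Int))) (disjuntores_gerais : List (String × Int)) : List (Int × List (Int × Int)) :=
  let pairs : List (Int × Int) :=
    circuitos.map (fun c => ((PySem.Dict.ofList c).getD "num_fases" 0, (PySem.Dict.ofList c).getD "Disjuntor (Ampere)" 0))
      ++ disjuntores_gerais.map (fun q => ((3 : Int), q.2))
  let tally : PySem.Dict (Int × Int) Int :=
    pairs.foldl (fun t k => t.insert k (t.getD k 0 + 1)) PySem.Dict.empty
  let materiais : PySem.Dict Int (PySem.Dict Int Int) :=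
    tally.items.foldl (fun m p => m.insert p.1.1 ((m.getD p.1.1 PySem.Dict.empty).insert p.1.2 p.2)) PySem.Dict.empty
  materiais.items.map (fun p => (p.1, p.2.items))

-- ===== PRECONDITION & SPEC =====
-- Pre_ excludes circuits missing the 'num_fases' or 'Disjuntor (Ampere)' key, on which the Python A raises KeyError.
def Pre_criar_lista_materiais (circuitos : List (List (String × Int))) (disjuntores_gerais : List (String × Int)) : Prop :=
  ∀ c ∈ circuitos, (PySem.Dict.ofList c).contains "num_fases" = true ∧ (PySem.Dict.ofList c).contains "Disjuntor (Ampere)" = true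
instance (circuitos : List (List (String × Int))) (disjuntores_gerais : List (String × Int)) : Decidable (Pre_criar_lista_materiais circuitos disjuntores_gerais) := by unfold Pre_criar_lista_materiais; infer_instance
def pvWitness_criar_lista_materiais : (List (List (String × Int))) × (List (String × Int)) :=
  ([[("num_fases", 1), ("Disjuntor (Ampere)", 10)], [("num_fases", 3), ("Disjuntor (Ampere)", 25)]], [("Quadro 1", 32)])

def Spec_criar_lista_materiais (circuitos : List (List (String × Int))) (disjuntores_gerais : List (String × Int)) (out : List (Int × List (Int × Int))) : Prop := out = criar_lista_materiais_alt circuitos disjuntores_gerais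
instance (circuitos : List (List (String × Int))) (disjuntores_gerais : List (String × Int)) (out : List (Int × List (Int × Int))) : Decidable (Spec_criar_lista_materiais circuitos disjuntores_gerais out) := by unfold Spec_criar_lista_materiais; infer_instance

-- ===== CLAIM (what is proved, stated in full; the proofs are below) =====
def Claim_equal_criar_lista_materiais : Prop := ∀ (circuitos : List (List (String × Int))) (disjuntores_gerais : List (String × Int)), Dom_criar_lista_materiais circuitos disjuntores_gerais → Pre_criar_lista_materiais circuitos disjuntores_gerais → Spec_criar_lista_materiais circuitos disjuntores_gerais (criar_lista_materiais circuitos disjuntores_gerais)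

-- ===== LEMMAS AND PROOFS =====

-- the common per-pair update step both ports reduce to, and the fold shapes of the two ports
def pvStep2 (m : PySem.Dict Int (PySem.Dict Int Int)) (k : Int × Int) : PySem.Dict Int (PySem.Dict Int Int) :=
  m.insert k.1 ((m.getD k.1 PySem.Dict.empty).insert k.2 ((m.getD k.1 PySem.Dict.empty).getD k.2 0 + 1))

def pvNested (l : List (Int × Int)) : PySem.Dict Int (PySem.Dict Int Int) := l.foldl pvStep2 PySem.Dict.empty

def pvPairs (circuitos : List (List (String × Int))) (dg : List (String × Int)) : List (Int × Int) :=
  circuitos.map (fun c => ((PySem.Dict.ofList c).getD "num_fases" 0, (PySem.Dict.ofList c).getD "Disjuntor (Ampere)" 0))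
    ++ dg.map (fun q => ((3 : Int), q.2))

def pvCnt {κ : Type} [BEq κ] (xs : List κ) : PySem.Dict κ Int :=
  xs.foldl (fun d x => d.insert x (d.getD x 0 + 1)) PySem.Dict.empty

def pvReshape (L : List ((Int × Int) × Int)) : PySem.Dict Int (PySem.Dict Int Int) :=
  L.foldl (fun m p => m.insert p.1.1 ((m.getD p.1.1 PySem.Dict.empty).insert p.1.2 p.2)) PySem.Dict.empty

lemma pvCnt_eq {κ : Type} [BEq κ] (xs : List κ) : pvCnt xs = PySem.Dict.counter xs :=
  PySem.Dict.foldl_insert_getD_add_one_eq_counter xs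

lemma pvNested_step (xs : List (Int × Int)) (x : Int × Int) : pvNested (xs ++ [x]) = pvStep2 (pvNested xs) x := by
  unfold pvNested
  rw [List.foldl_append]
  rfl

lemma pvCnt_step {κ : Type} [BEq κ] (ys : List κ) (a : κ) :
    pvCnt (ys ++ [a]) = (pvCnt ys).insert a ((pvCnt ys).getD a 0 + 1) := by
  unfold pvCnt
  rw [List.foldl_append]
  rfl

lemma pvReshape_step (xs : List ((Int × Int) × Int)) (x : (Int × Int) × Int) :
    pvReshape (xs ++ [x]) = (pvReshape xs).insert x.1.1 (((pvReshape xs).getD x.1.1 PySem.Dict.empty).insert x.1.2 x.2) := by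
  unfold pvReshape
  rw [List.foldl_append]
  rfl

lemma pv_guard_eq (m : PySem.Dict Int (PySem.Dict Int Int)) (f a : Int) :
    (let m' := if m.contains f then m else m.insert f PySem.Dict.empty
     let i := m'.getD f PySem.Dict.empty
     let i' := if i.contains a then i else i.insert a 0
     m'.insert f (i'.insert a (i'.getD a 0 + 1))) = pvStep2 m (f, a) := by
  unfold pvStep2
  by_cases hm : m.contains f = true
  · simp only [hm, if_true]
    by_cases hi : (m.getD f PySem.Dict.empty).contains a = true
    · simp [hi]
    · have hif : (m.getD f PySem.Dict.empty).contains a = false := by simpa using hi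
      simp [hif, PySem.Dict.getD_insert_self, PySem.Dict.insert_insert_self,
        PySem.Dict.getD_of_not_contains _ _ hif]
  · have hmf : m.contains f = false := by simpa using hm
    simp [hmf, PySem.Dict.getD_insert_self, PySem.Dict.insert_insert_self,
      PySem.Dict.getD_of_not_contains _ _ hmf, PySem.Dict.contains_empty, PySem.Dict.getD_empty]

lemma pvA_eq (circuitos : List (List (String × Int))) (dg : List (String × Int)) :
    criar_lista_materiais circuitos dg = (pvNested (pvPairs circuitos dg)).items.map (fun p => (p.1, p.2.items)) := by
  unfold criar_lista_materiais pvPairs pvNested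
  rw [List.foldl_append, List.foldl_map, List.foldl_map]
  simp only [pv_guard_eq]

lemma pvB_eq (circuitos : List (List (String × Int))) (dg : List (String × Int)) :
    criar_lista_materiais_alt circuitos dg = (pvReshape ((pvCnt (pvPairs circuitos dg)).items)).items.map (fun p => (p.1, p.2.items)) := by
  rfl

-- A-side characterisation: outer keys and per-phase inner dict of the nested fold
lemma pvNested_keys (l : List (Int × Int)) : (pvNested l).keys = PySem.Set.ofList (l.map (fun p => p.1)) := by
  unfold pvNested pvStep2
  rw [PySem.Dict.keys_foldl_insert_key]
  simp [PySem.Dict.keys_empty, PySem.Set.update_nil_left]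

lemma pvNested_nodup (l : List (Int × Int)) : (pvNested l).keys.Nodup := by
  unfold pvNested pvStep2
  exact PySem.Dict.nodup_keys_foldl_insert_key _ _ _ _ (by simp [PySem.Dict.keys_empty])

lemma pvNested_getD (l : List (Int × Int)) (f : Int) :
    (pvNested l).getD f PySem.Dict.empty = pvCnt ((l.filter (fun p => p.1 == f)).map (fun p => p.2)) := by
  induction l using List.reverseRecOn with
  | nil => simp [pvNested, pvCnt, PySem.Dict.getD_empty]
  | append_singleton xs x ih =>
    rw [pvNested_step]
    unfold pvStep2
    rw [PySem.Dict.getD_insert, List.filter_append]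
    by_cases h : f = x.1
    · rw [h] at ih ⊢
      rw [if_pos rfl]
      have hfx : List.filter (fun p => p.1 == x.1) [x] = [x] := by simp
      rw [hfx, List.map_append, List.map_singleton, pvCnt_step, ih]
    · rw [if_neg h]
      have hfx : List.filter (fun p => p.1 == f) [x] = [] := by
        simp only [List.filter_cons, List.filter_nil]
        have : (x.1 == f) = false := by simp; omega
        simp [this]
      rw [hfx, List.append_nil, ih]

-- B-side characterisation: outer keys and per-phase inner dict of the reshape fold
lemma pvReshape_keys (L : List ((Int × Int) × Int)) : (pvReshape L).keys = PySem.Set.ofList (L.map (fun p => p.1.1)) := by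
  unfold pvReshape
  rw [PySem.Dict.keys_foldl_insert_key]
  simp [PySem.Dict.keys_empty, PySem.Set.update_nil_left]

lemma pvReshape_nodup (L : List ((Int × Int) × Int)) : (pvReshape L).keys.Nodup := by
  unfold pvReshape
  exact PySem.Dict.nodup_keys_foldl_insert_key _ _ _ _ (by simp [PySem.Dict.keys_empty])

lemma pvReshape_getD (L : List ((Int × Int) × Int)) (f : Int) :
    (pvReshape L).getD f PySem.Dict.empty =
      (L.filter (fun p => p.1.1 == f)).foldl (fun i p => i.insert p.1.2 p.2) PySem.Dict.empty := by
  induction L using List.reverseRecOn with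
  | nil => simp [pvReshape, PySem.Dict.getD_empty]
  | append_singleton xs x ih =>
    rw [pvReshape_step, PySem.Dict.getD_insert, List.filter_append]
    by_cases h : f = x.1.1
    · rw [h] at ih ⊢
      rw [if_pos rfl]
      have hfx : List.filter (fun p => p.1.1 == x.1.1) [x] = [x] := by simp
      rw [hfx, List.foldl_append, ih]
      rfl
    · rw [if_neg h]
      have hfx : List.filter (fun p => p.1.1 == f) [x] = [] := by
        simp only [List.filter_cons, List.filter_nil]
        have : (x.1.1 == f) = false := by simp; omega
        simp [this]
      rw [hfx, List.append_nil, ih]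

-- first-occurrence dedup commutes with map and filter
lemma pv_set_map {α β : Type} [BEq α] [LawfulBEq α] [BEq β] [LawfulBEq β] (xs : List α) (g : α → β) :
    PySem.Set.ofList ((PySem.Set.ofList xs).map g) = PySem.Set.ofList (xs.map g) := by
  induction xs using List.reverseRecOn with
  | nil => simp
  | append_singleton xs x ih =>
    rw [PySem.Set.ofList_append_singleton, List.map_append, List.map_singleton,
      PySem.Set.ofList_append_singleton, ← ih]
    by_cases hx : x ∈ PySem.Set.ofList xs
    · rw [PySem.Set.add_of_mem hx,
        PySem.Set.add_of_mem ((PySem.Set.mem_ofList _ _).mpr (List.mem_map_of_mem hx))]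
    · rw [PySem.Set.add_of_not_mem hx, List.map_append, List.map_singleton,
        PySem.Set.ofList_append_singleton]

lemma pv_set_filter {α : Type} [BEq α] [LawfulBEq α] (xs : List α) (p : α → Bool) :
    (PySem.Set.ofList xs).filter p = PySem.Set.ofList (xs.filter p) := by
  induction xs using List.reverseRecOn with
  | nil => simp
  | append_singleton xs x ih =>
    rw [PySem.Set.ofList_append_singleton, List.filter_append]
    by_cases hp : p x = true
    · have hfx : List.filter p [x] = [x] := by simp [hp]
      rw [hfx]
      by_cases hx : x ∈ PySem.Set.ofList xs
      · have hxf : x ∈ List.filter p xs := List.mem_filter.mpr ⟨(PySem.Set.mem_ofList _ _).mp hx, hp⟩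
        rw [PySem.Set.add_of_mem hx, ih, PySem.Set.ofList_append_singleton,
          PySem.Set.add_of_mem ((PySem.Set.mem_ofList _ _).mpr hxf)]
      · have hnx : x ∉ List.filter p xs := fun hm => hx ((PySem.Set.mem_ofList _ _).mpr (List.mem_filter.mp hm).1)
        rw [PySem.Set.add_of_not_mem hx, List.filter_append, hfx, ih, PySem.Set.ofList_append_singleton,
          PySem.Set.add_of_not_mem (fun hm => hnx ((PySem.Set.mem_ofList _ _).mp hm))]
    · have hfx : List.filter p [x] = [] := by simp [hp]
      rw [hfx, List.append_nil]
      by_cases hx : x ∈ PySem.Set.ofList xs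
      · rw [PySem.Set.add_of_mem hx, ih]
      · rw [PySem.Set.add_of_not_mem hx, List.filter_append, hfx, List.append_nil, ih]

-- a deduplicated list of pairs that all share the first component f is (f, ·) of its deduplicated seconds
lemma pv_set_snd (P : List (Int × Int)) (f : Int) (hf : ∀ p ∈ P, p.1 = f) :
    PySem.Set.ofList P = (PySem.Set.ofList (P.map (fun p => p.2))).map (fun a => (f, a)) := by
  induction P using List.reverseRecOn with
  | nil => simp
  | append_singleton P p ih =>
    have hp1 : p.1 = f := hf p (by simp)
    have hfP : ∀ q ∈ P, q.1 = f := fun q hq => hf q (by simp [hq])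
    rw [PySem.Set.ofList_append_singleton, List.map_append, List.map_singleton,
      PySem.Set.ofList_append_singleton]
    by_cases hx : p ∈ PySem.Set.ofList P
    · have h2 : p.2 ∈ PySem.Set.ofList (P.map (fun q => q.2)) :=
        (PySem.Set.mem_ofList _ _).mpr (List.mem_map_of_mem ((PySem.Set.mem_ofList _ _).mp hx))
      rw [PySem.Set.add_of_mem hx, PySem.Set.add_of_mem h2]
      exact ih hfP
    · have h2 : p.2 ∉ PySem.Set.ofList (P.map (fun q => q.2)) := by
        intro hmem
        rcases List.mem_map.mp ((PySem.Set.mem_ofList _ _).mp hmem) with ⟨q, hq, hq2⟩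
        have : q = p := Prod.ext ((hfP q hq).trans hp1.symm) hq2
        exact hx ((PySem.Set.mem_ofList _ _).mpr (this ▸ hq))
      rw [PySem.Set.add_of_not_mem hx, PySem.Set.add_of_not_mem h2, List.map_append,
        List.map_singleton, ih hfP, ← hp1]

lemma pv_count_snd (l : List (Int × Int)) (f a : Int) :
    ((l.filter (fun p => p.1 == f)).map (fun p => p.2)).count a = l.count (f, a) := by
  induction l with
  | nil => simp
  | cons x l ih =>
    by_cases h1 : x.1 = f
    · by_cases h2 : x.2 = a
      · have hx : x = (f, a) := Prod.ext h1 h2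
        simp [hx, ih]
      · have hx : x ≠ (f, a) := fun he => h2 (by simp [he])
        simp [h1, h2, hx, ih]
    · have hx : x ≠ (f, a) := fun he => h1 (by simp [he])
      have hb : (x.1 == f) = false := by simp [h1]
      simp [hb, hx, ih]

-- reshaping the tally reproduces, per phase, exactly the inner dict of the nested fold
lemma pv_getD_eq (l : List (Int × Int)) (f : Int) :
    (pvReshape ((pvCnt l).items)).getD f PySem.Dict.empty = (pvNested l).getD f PySem.Dict.empty := by
  rw [pvReshape_getD, pvNested_getD, pvCnt_eq, pvCnt_eq, PySem.Dict.items_counter, List.filter_map]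
  have hcomp : ((fun p : (Int × Int) × Int => p.1.1 == f) ∘ fun k : Int × Int => (k, (l.count k : Int)))
      = fun k : Int × Int => k.1 == f := rfl
  rw [hcomp, pv_set_filter]
  have hfP : ∀ p ∈ l.filter (fun k => k.1 == f), p.1 = f := by
    intro p hp
    have := (List.mem_filter.mp hp).2
    simpa using this
  rw [pv_set_snd _ f hfP, List.map_map]
  apply PySem.Dict.ext
  rw [PySem.Dict.items_counter]
  rw [PySem.Dict.items_foldl_insert_fresh _ (fun p : (Int × Int) × Int => p.1.2) (fun p => p.2)
    PySem.Dict.empty (fun q _ => PySem.Dict.contains_empty _)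
    (by
      rw [List.map_map,
        show ((fun p : (Int × Int) × Int => p.1.2) ∘ ((fun k : Int × Int => (k, (l.count k : Int))) ∘ fun a : Int => (f, a))) = id from rfl,
        List.map_id]
      exact PySem.Set.nodup_ofList _)]
  rw [show (PySem.Dict.empty : PySem.Dict Int Int).items = [] from rfl, List.nil_append, List.map_map]
  apply List.map_congr_left
  intro a _
  simp only [Function.comp]
  rw [← pv_count_snd l f a]

-- the flat tally reshaped IS the nested dict
lemma pv_main (l : List (Int × Int)) : pvReshape ((pvCnt l).items) = pvNested l := by
  apply PySem.Dict.ext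
  rw [PySem.Dict.items_eq_map_keys _ (pvReshape_nodup _) PySem.Dict.empty,
    PySem.Dict.items_eq_map_keys _ (pvNested_nodup _) PySem.Dict.empty]
  have hk : (pvReshape ((pvCnt l).items)).keys = (pvNested l).keys := by
    rw [pvReshape_keys, pvNested_keys, pvCnt_eq, PySem.Dict.items_counter, List.map_map]
    have hcomp : ((fun p : (Int × Int) × Int => p.1.1) ∘ fun k : Int × Int => (k, (l.count k : Int)))
        = fun k : Int × Int => k.1 := rfl
    rw [hcomp, pv_set_map]
  rw [hk]
  apply List.map_congr_left
  intro f _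
  rw [pv_getD_eq]

-- ===== VERDICT (by name: the statement is the Claim_ definition above) =====
theorem criar_lista_materiais_spec : Claim_equal_criar_lista_materiais := by
  intro circuitos dg _hdom _hpre
  unfold Spec_criar_lista_materiais
  rw [pvA_eq, pvB_eq, pv_main]
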